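-- pv_equiv track=rewrite | github.com/sdpython/mlstatpy | mlstatpy/graph/graph_distance.py | private_count_left_right
-- ===== SOURCE A (Python) =====
-- def private_count_left_right(valuesInList):
--     countLeft = {}
--     countRight = {}
--     for _k, v in valuesInList:
--         i, j = v
--         if i not in countRight:
--             countRight[i] = {}
--         countRight[i][j] = countRight[i].get(j, 0) + 1
--         if j not in countLeft:
--             countLeft[j] = {}
--         countLeft[j][i] = countLeft[j].get(i, 0) + 1
--     return countLeft, countRight
-- ===== SOURCE B (Python) =====
-- def _side(pairs):
--     # distinct pairs in first-occurrence order; count each distinct pair once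
--     out = {}
--     for p in dict.fromkeys(pairs):
--         i, j = p
--         out.setdefault(i, {})[j] = pairs.count(p)
--     return out
--
--
-- def private_count_left_right(valuesInList):
--     pairs = [v for _k, v in valuesInList]
--     swapped = [(j, i) for i, j in pairs]
--     return _side(swapped), _side(pairs)
-- ===== Notes on version B (the rewrite author's own statement) =====
-- stated objective: alternative
-- what changed: Instead of A's single pass incrementing two nested dicts per element, B extracts the pair list, dedupes it in first-occurrence order with dict.fromkeys, and builds each side with a shared helper that sets each distinct pair's cell once to pairs.count(pair) (the left side fed the swapped pairs).
import Mathlib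
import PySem

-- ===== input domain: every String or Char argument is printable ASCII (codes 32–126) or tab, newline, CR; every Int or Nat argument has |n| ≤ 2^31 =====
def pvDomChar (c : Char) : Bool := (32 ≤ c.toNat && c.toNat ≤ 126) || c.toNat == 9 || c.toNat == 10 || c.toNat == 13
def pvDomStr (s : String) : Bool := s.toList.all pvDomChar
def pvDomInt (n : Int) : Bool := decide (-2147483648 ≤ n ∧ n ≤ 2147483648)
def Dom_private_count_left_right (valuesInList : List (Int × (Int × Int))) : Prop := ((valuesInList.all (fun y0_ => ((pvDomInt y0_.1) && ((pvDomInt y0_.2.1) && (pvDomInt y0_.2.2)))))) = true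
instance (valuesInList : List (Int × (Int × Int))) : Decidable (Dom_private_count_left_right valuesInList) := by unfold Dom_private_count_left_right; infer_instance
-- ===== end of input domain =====

-- B replaces A's single incrementing pass by: extract the pairs, dedupe them in first-occurrence
-- order, and set each distinct pair's cell once to pairs.count(pair), one generic helper per side
-- (objective: alternative decomposition, same result).

-- ===== PORT A =====
-- loop body of A's single pass (one (_k, v) element of valuesInList)
def pclrStepA
    (st : PySem.Dict Int (PySem.Dict Int Int) × PySem.Dict Int (PySem.Dict Int Int))
    (kv : Int × (Int × Int)) :
    PySem.Dict Int (PySem.Dict Int Int) × PySem.Dict Int (PySem.Dict Int Int) :=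
  let countLeft := st.1
  let countRight := st.2
  let i := kv.2.1
  let j := kv.2.2
  -- if i not in countRight: countRight[i] = {}
  let countRight := if countRight.contains i then countRight else countRight.insert i PySem.Dict.empty
  -- countRight[i][j] = countRight[i].get(j, 0) + 1
  let countRight := countRight.modify i PySem.Dict.empty (fun inner => inner.insert j (inner.getD j 0 + 1))
  -- if j not in countLeft: countLeft[j] = {}
  let countLeft := if countLeft.contains j then countLeft else countLeft.insert j PySem.Dict.empty
  -- countLeft[j][i] = countLeft[j].get(i, 0) + 1
  let countLeft := countLeft.modify j PySem.Dict.empty (fun inner => inner.insert i (inner.getD i 0 + 1))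
  (countLeft, countRight)

def private_count_left_right (valuesInList : List (Int × (Int × Int))) :
    (List (Int × List (Int × Int))) × (List (Int × List (Int × Int))) :=
  let res := valuesInList.foldl pclrStepA (PySem.Dict.empty, PySem.Dict.empty)
  (res.1.items.map (fun p => (p.1, p.2.items)), res.2.items.map (fun p => (p.1, p.2.items)))

-- ===== PORT B =====
-- _side(pairs): for p in dict.fromkeys(pairs): out.setdefault(i, {})[j] = pairs.count(p)
-- (dict.fromkeys = the distinct pairs in first-occurrence order = PySem.Set.ofList)
def pclrSide (pairs : List (Int × Int)) : PySem.Dict Int (PySem.Dict Int Int) :=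
  (PySem.Set.ofList pairs).foldl
    (fun out p =>
      (out.setdefault p.1 PySem.Dict.empty).modify p.1 PySem.Dict.empty
        (fun inner => inner.insert p.2 ((pairs.count p : Int))))
    PySem.Dict.empty

def private_count_left_right_alt (valuesInList : List (Int × (Int × Int))) :
    (List (Int × List (Int × Int))) × (List (Int × List (Int × Int))) :=
  -- pairs = [v for _k, v in valuesInList]; swapped = [(j, i) for i, j in pairs]
  let pairs := valuesInList.map (fun kv => kv.2)
  let swapped := pairs.map (fun p => (p.2, p.1))
  -- return _side(swapped), _side(pairs)
  ((pclrSide swapped).items.map (fun q => (q.1, q.2.items)),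
   (pclrSide pairs).items.map (fun q => (q.1, q.2.items)))

-- ===== PRECONDITION & SPEC =====
def Spec_private_count_left_right (valuesInList : List (Int × (Int × Int))) (out : (List (Int × List (Int × Int))) × (List (Int × List (Int × Int)))) : Prop := out = private_count_left_right_alt valuesInList
instance (valuesInList : List (Int × (Int × Int))) (out : (List (Int × List (Int × Int))) × (List (Int × List (Int × Int)))) : Decidable (Spec_private_count_left_right valuesInList out) := by unfold Spec_private_count_left_right; infer_instance

-- ===== CLAIM (what is proved, stated in full; the proofs are below) =====
def Claim_equal_private_count_left_right : Prop := ∀ (valuesInList : List (Int × (Int × Int))), Dom_private_count_left_right valuesInList → Spec_private_count_left_right valuesInList (private_count_left_right valuesInList)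

-- ===== LEMMAS AND PROOFS =====

-- the generic shape of A's loop body, one dict at a time: key by f, bump the inner count at g
def pclrGStep (f g : Int × Int → Int) (d : PySem.Dict Int (PySem.Dict Int Int)) (q : Int × Int) :
    PySem.Dict Int (PySem.Dict Int Int) :=
  d.modify (f q) PySem.Dict.empty (fun inner => inner.insert (g q) (inner.getD (g q) 0 + 1))

lemma pclr_if_modify {κ ν : Type} [BEq κ] [LawfulBEq κ] (d : PySem.Dict κ ν) (k : κ) (e : ν) (f : ν → ν) :
    (if d.contains k then d else d.insert k e).modify k e f = d.modify k e f := by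
  by_cases h : d.contains k = true
  · simp [h]
  · simp only [Bool.not_eq_true] at h
    simp [h, PySem.Dict.modify, PySem.Dict.getD_insert_self, PySem.Dict.insert_insert_self,
      PySem.Dict.getD_of_not_contains d e h]

lemma pclr_setdefault_modify {κ ν : Type} [BEq κ] [LawfulBEq κ] (d : PySem.Dict κ ν) (k : κ) (e : ν) (f : ν → ν) :
    (d.setdefault k e).modify k e f = d.modify k e f := by
  by_cases h : d.contains k = true
  · rw [PySem.Dict.setdefault_of_contains d e h]
  · simp only [Bool.not_eq_true] at h
    rw [PySem.Dict.setdefault_of_not_contains d e h]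
    simp [PySem.Dict.modify, PySem.Dict.getD_insert_self, PySem.Dict.insert_insert_self,
      PySem.Dict.getD_of_not_contains d e h]

lemma pclrStepA_eq (st : PySem.Dict Int (PySem.Dict Int Int) × PySem.Dict Int (PySem.Dict Int Int))
    (kv : Int × (Int × Int)) :
    pclrStepA st kv = (pclrGStep Prod.snd Prod.fst st.1 kv.2, pclrGStep Prod.fst Prod.snd st.2 kv.2) := by
  simp only [pclrStepA, pclrGStep, pclr_if_modify]

lemma pclr_foldl_pair {α β γ : Type} (φ : α → γ → α) (ψ : β → γ → β) :
    ∀ (l : List γ) (a : α) (b : β),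
      l.foldl (fun st x => (φ st.1 x, ψ st.2 x)) (a, b) = (l.foldl φ a, l.foldl ψ b) := by
  intro l
  induction l with
  | nil => intro a b; rfl
  | cons x l ih => intro a b; simpa using ih (φ a x) (ψ b x)

-- getD of a keyed-modify fold: only the entries whose key matches survive, in order
lemma pclr_getD_foldl_modify_key {κ ν β : Type} [BEq κ] [LawfulBEq κ] [DecidableEq κ]
    (key : β → κ) (F : β → ν → ν) (e : ν) :
    ∀ (l : List β) (d : PySem.Dict κ ν) (c : κ),
      (l.foldl (fun d x => d.modify (key x) e (F x)) d).getD c e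
        = (l.filter (fun x => key x == c)).foldl (fun v x => F x v) (d.getD c e) := by
  intro l
  induction l with
  | nil => intro d c; rfl
  | cons x l ih =>
    intro d c
    by_cases h : key x = c
    · subst h
      simp [ih, PySem.Dict.getD_modify_self]
    · simp [h, ih, PySem.Dict.getD_modify, Ne.symm h]

lemma pclr_ofList_filter {α : Type} [BEq α] [LawfulBEq α] (p : α → Bool) (xs : List α) :
    PySem.Set.ofList (xs.filter p) = (PySem.Set.ofList xs).filter p := by
  induction xs using List.reverseRecOn with
  | nil => rfl
  | append_singleton xs x ih =>
    rw [List.filter_append, PySem.Set.ofList_append_singleton]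
    by_cases hx : x ∈ xs
    · rw [PySem.Set.add_of_mem ((PySem.Set.mem_ofList xs x).mpr hx)]
      cases hp : p x
      · simpa [hp] using ih
      · rw [show List.filter p [x] = [x] by simp [hp], PySem.Set.ofList_append_singleton, ih,
          PySem.Set.add_of_mem]
        simp [List.mem_filter, (PySem.Set.mem_ofList xs x).mpr hx, hp]
    · have hxS : x ∉ PySem.Set.ofList xs := fun hc => hx ((PySem.Set.mem_ofList xs x).mp hc)
      have hxF : x ∉ List.filter p (PySem.Set.ofList xs) :=
        fun hc => hxS (List.mem_filter.mp hc).1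
      rw [PySem.Set.add_of_not_mem hxS, List.filter_append]
      cases hp : p x
      · simpa [hp] using ih
      · rw [show List.filter p [x] = [x] by simp [hp], PySem.Set.ofList_append_singleton, ih,
          PySem.Set.add_of_not_mem hxF]

lemma pclr_ofList_map_ofList {α β : Type} [BEq α] [LawfulBEq α] [BEq β] [LawfulBEq β]
    (f : α → β) (xs : List α) :
    PySem.Set.ofList ((PySem.Set.ofList xs).map f) = PySem.Set.ofList (xs.map f) := by
  induction xs using List.reverseRecOn with
  | nil => rfl
  | append_singleton xs x ih =>
    rw [PySem.Set.ofList_append_singleton]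
    by_cases hx : x ∈ xs
    · rw [PySem.Set.add_of_mem ((PySem.Set.mem_ofList xs x).mpr hx), ih, List.map_append]
      rw [show List.map f [x] = [f x] from rfl, PySem.Set.ofList_append_singleton,
        PySem.Set.add_of_mem]
      exact (PySem.Set.mem_ofList _ _).mpr (List.mem_map_of_mem hx)
    · rw [PySem.Set.add_of_not_mem (fun hc => hx ((PySem.Set.mem_ofList xs x).mp hc)),
        List.map_append, List.map_append]
      rw [show List.map f [x] = [f x] from rfl, PySem.Set.ofList_append_singleton,
        PySem.Set.ofList_append_singleton, ih]

lemma pclr_ofList_map_inj {α β : Type} [BEq α] [LawfulBEq α] [BEq β] [LawfulBEq β] (g : α → β) :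
    ∀ (xs : List α), (∀ a ∈ xs, ∀ b ∈ xs, g a = g b → a = b) →
      PySem.Set.ofList (xs.map g) = (PySem.Set.ofList xs).map g := by
  intro xs
  induction xs using List.reverseRecOn with
  | nil => intro _; rfl
  | append_singleton xs x ih =>
    intro hinj
    have hsub : ∀ a ∈ xs, ∀ b ∈ xs, g a = g b → a = b := by
      intro a ha b hb
      exact hinj a (by simp [ha]) b (by simp [hb])
    rw [List.map_append, show List.map g [x] = [g x] from rfl,
      PySem.Set.ofList_append_singleton, PySem.Set.ofList_append_singleton, ih hsub]
    by_cases hx : x ∈ xs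
    · rw [PySem.Set.add_of_mem ((PySem.Set.mem_ofList xs x).mpr hx),
        PySem.Set.add_of_mem]
      exact List.mem_map_of_mem ((PySem.Set.mem_ofList xs x).mpr hx)
    · have hxS : x ∉ PySem.Set.ofList xs := fun hc => hx ((PySem.Set.mem_ofList xs x).mp hc)
      have hgx : g x ∉ List.map g (PySem.Set.ofList xs) := by
        intro hc
        rcases List.mem_map.mp hc with ⟨a, ha, hga⟩
        have : a = x := hinj a (by simp [(PySem.Set.mem_ofList xs a).mp ha]) x (by simp) hga
        exact hx (this ▸ (PySem.Set.mem_ofList xs a).mp ha)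
      rw [PySem.Set.add_of_not_mem hxS, PySem.Set.add_of_not_mem hgx, List.map_append]
      rfl

-- the joint-injectivity both instantiations (fst,snd) and (snd,fst) enjoy
def pclrInj (f g : Int × Int → Int) : Prop := ∀ q q' : Int × Int, f q = f q' → g q = g q' → q = q'

lemma pclr_count_filter_map (f g : Int × Int → Int) (hinj : pclrInj f g)
    (ps : List (Int × Int)) (c : Int) (q : Int × Int) (hq : f q = c) :
    ((ps.filter (fun r => f r == c)).map g).count (g q) = ps.count q := by
  rw [List.count_eq_countP, List.countP_map, List.countP_filter, List.count_eq_countP]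
  apply List.countP_congr
  intro a _
  simp only [Function.comp, Bool.and_eq_true, beq_iff_eq]
  constructor
  · rintro ⟨h1, h2⟩
    exact hinj a q (h2.trans hq.symm) h1
  · rintro rfl
    exact ⟨rfl, hq⟩

-- A's dict, one side: getD c is the counter of the matching inner keys, in order
lemma pclr_gA_getD (f g : Int × Int → Int) (ps : List (Int × Int)) (c : Int) :
    (ps.foldl (pclrGStep f g) PySem.Dict.empty).getD c PySem.Dict.empty
      = PySem.Dict.counter ((ps.filter (fun r => f r == c)).map g) := by
  rw [show (ps.foldl (pclrGStep f g) PySem.Dict.empty)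
        = ps.foldl (fun d x => d.modify (f x) PySem.Dict.empty
            (fun inner => inner.insert (g x) (inner.getD (g x) 0 + 1))) PySem.Dict.empty from rfl,
    pclr_getD_foldl_modify_key]
  rw [PySem.Dict.getD_empty, ← PySem.Dict.foldl_insert_getD_add_one_eq_counter, List.foldl_map]

-- B's dict: getD c of pclrSide qs is the same counter (keyed by fst, inner keys snd)
lemma pclr_side_getD (qs : List (Int × Int)) (c : Int) :
    (pclrSide qs).getD c PySem.Dict.empty
      = PySem.Dict.counter ((qs.filter (fun r => r.1 == c)).map Prod.snd) := by
  have hinj : pclrInj Prod.fst Prod.snd := fun q q' h1 h2 => Prod.ext h1 h2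
  have hSF : PySem.Set.ofList (qs.filter (fun r => r.1 == c))
      = (PySem.Set.ofList qs).filter (fun r => r.1 == c) := pclr_ofList_filter _ qs
  have hSFnodup : ((PySem.Set.ofList qs).filter (fun r => r.1 == c)).Nodup :=
    List.Nodup.filter _ (PySem.Set.nodup_ofList qs)
  have hinjF : ∀ a ∈ (PySem.Set.ofList qs).filter (fun r => r.1 == c),
      ∀ b ∈ (PySem.Set.ofList qs).filter (fun r => r.1 == c), a.2 = b.2 → a = b := by
    intro a ha b hb hg
    have hfa : a.1 = c := by simpa using (List.mem_filter.mp ha).2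
    have hfb : b.1 = c := by simpa using (List.mem_filter.mp hb).2
    exact hinj a b (hfa.trans hfb.symm) hg
  have hmapNodup : (((PySem.Set.ofList qs).filter (fun r => r.1 == c)).map Prod.snd).Nodup :=
    List.Nodup.map_on hinjF hSFnodup
  rw [show pclrSide qs
        = (PySem.Set.ofList qs).foldl (fun d x => d.modify ((fun (p : Int × Int) => p.1) x) PySem.Dict.empty
            ((fun (p : Int × Int) (inner : PySem.Dict Int Int) => inner.insert p.2 ((qs.count p : Int))) x))
            PySem.Dict.empty from by
      unfold pclrSide
      rw [show (fun (out : PySem.Dict Int (PySem.Dict Int Int)) (p : Int × Int) =>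
            (out.setdefault p.1 PySem.Dict.empty).modify p.1 PySem.Dict.empty
              (fun inner => inner.insert p.2 ((qs.count p : Int))))
          = fun out p => out.modify p.1 PySem.Dict.empty
              (fun inner => inner.insert p.2 ((qs.count p : Int))) from
        funext fun out => funext fun p => pclr_setdefault_modify _ _ _ _],
    pclr_getD_foldl_modify_key, PySem.Dict.getD_empty]
  apply PySem.Dict.ext
  show (List.foldl (fun d (q : Int × Int) => d.insert q.2 ((List.count q qs : Int)))
      PySem.Dict.empty ((PySem.Set.ofList qs).filter (fun r => r.1 == c))).items = _
  rw [PySem.Dict.items_foldl_insert_fresh _ (fun q => q.2) (fun q => (List.count q qs : Int))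
      PySem.Dict.empty (fun a _ => PySem.Dict.contains_empty _) hmapNodup]
  rw [PySem.Dict.items_counter, pclr_ofList_map_inj Prod.snd _ (by
      intro a ha b hb hg
      have hfa : a.1 = c := by simpa using (List.mem_filter.mp ha).2
      have hfb : b.1 = c := by simpa using (List.mem_filter.mp hb).2
      exact hinj a b (hfa.trans hfb.symm) hg), hSF, List.map_map]
  apply List.map_congr_left
  intro a ha
  have hfa : a.1 = c := by simpa using (List.mem_filter.mp ha).2
  show (a.2, ((List.count a qs : Int))) = (a.2, ((List.count a.2 (List.map Prod.snd (List.filter (fun r => r.1 == c) qs)) : Int)))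
  rw [pclr_count_filter_map Prod.fst Prod.snd hinj qs c a hfa]

-- the core: A's fst/snd fold equals B's dedupe-and-count helper
lemma pclr_side_eq (qs : List (Int × Int)) :
    qs.foldl (pclrGStep Prod.fst Prod.snd) PySem.Dict.empty = pclrSide qs := by
  have hkA : (qs.foldl (pclrGStep Prod.fst Prod.snd) PySem.Dict.empty).keys
      = PySem.Set.ofList (qs.map Prod.fst) := by
    rw [show qs.foldl (pclrGStep Prod.fst Prod.snd) PySem.Dict.empty
          = qs.foldl (fun d x => d.modify (Prod.fst x) PySem.Dict.empty
              ((fun (_ : PySem.Dict Int (PySem.Dict Int Int)) (q : Int × Int)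
                  (inner : PySem.Dict Int Int) => inner.insert q.2 (inner.getD q.2 0 + 1)) d x))
              PySem.Dict.empty from rfl,
      PySem.Dict.keys_foldl_modify_key, PySem.Dict.keys_empty, PySem.Set.update_nil_left]
  have hkB : (pclrSide qs).keys = PySem.Set.ofList (qs.map Prod.fst) := by
    rw [show pclrSide qs
          = (PySem.Set.ofList qs).foldl (fun d x => d.modify ((fun (p : Int × Int) => p.1) x) PySem.Dict.empty
              ((fun (_ : PySem.Dict Int (PySem.Dict Int Int)) (p : Int × Int)
                  (inner : PySem.Dict Int Int) => inner.insert p.2 ((qs.count p : Int))) d x))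
              PySem.Dict.empty from by
        unfold pclrSide
        rw [show (fun (out : PySem.Dict Int (PySem.Dict Int Int)) (p : Int × Int) =>
              (out.setdefault p.1 PySem.Dict.empty).modify p.1 PySem.Dict.empty
                (fun inner => inner.insert p.2 ((qs.count p : Int))))
            = fun out p => out.modify p.1 PySem.Dict.empty
                (fun inner => inner.insert p.2 ((qs.count p : Int))) from
          funext fun out => funext fun p => pclr_setdefault_modify _ _ _ _],
      PySem.Dict.keys_foldl_modify_key, PySem.Dict.keys_empty, PySem.Set.update_nil_left]
    exact pclr_ofList_map_ofList Prod.fst qs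
  have hnA : (qs.foldl (pclrGStep Prod.fst Prod.snd) PySem.Dict.empty).keys.Nodup := by
    rw [hkA]; exact PySem.Set.nodup_ofList _
  have hnB : (pclrSide qs).keys.Nodup := by
    rw [hkB]; exact PySem.Set.nodup_ofList _
  apply PySem.Dict.ext
  rw [PySem.Dict.items_eq_map_keys _ hnA PySem.Dict.empty,
    PySem.Dict.items_eq_map_keys _ hnB PySem.Dict.empty, hkA, hkB]
  apply List.map_congr_left
  intro k _
  rw [pclr_gA_getD, pclr_side_getD]

theorem pclr_main (vs : List (Int × (Int × Int))) :
    private_count_left_right vs = private_count_left_right_alt vs := by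
  unfold private_count_left_right private_count_left_right_alt
  dsimp only
  rw [show pclrStepA = (fun st kv => (pclrGStep Prod.snd Prod.fst st.1 kv.2,
        pclrGStep Prod.fst Prod.snd st.2 kv.2)) from funext fun st => funext fun kv => pclrStepA_eq st kv,
    pclr_foldl_pair (fun a (kv : Int × (Int × Int)) => pclrGStep Prod.snd Prod.fst a kv.2)
      (fun b (kv : Int × (Int × Int)) => pclrGStep Prod.fst Prod.snd b kv.2) vs]
  rw [show (vs.foldl (fun a kv => pclrGStep Prod.snd Prod.fst a kv.2) PySem.Dict.empty)
        = (((vs.map (fun kv => kv.2)).map (fun p => (p.2, p.1))).foldl (pclrGStep Prod.fst Prod.snd) PySem.Dict.empty) from by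
      rw [List.foldl_map, List.foldl_map]; rfl,
    show (vs.foldl (fun a kv => pclrGStep Prod.fst Prod.snd a kv.2) PySem.Dict.empty)
        = ((vs.map (fun kv => kv.2)).foldl (pclrGStep Prod.fst Prod.snd) PySem.Dict.empty) from
      (List.foldl_map).symm,
    pclr_side_eq, pclr_side_eq]

-- ===== VERDICT (by name: the statement is the Claim_ definition above) =====
theorem private_count_left_right_spec : Claim_equal_private_count_left_right := by
  intro vs _
  unfold Spec_private_count_left_right
  exact pclr_main vs
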